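-- pv_equiv track=rewrite | github.com/daniel-reich/ubiquitous-fiesta | Dp9oYY4faMbdzufxR_20.py | left_slide
-- ===== SOURCE A (Python) =====
-- def left_slide(tiles):
--     '''
--     Returns tiles after they have been merged to the left as per the rules of
--     2048 described in the instructions.
--     '''
--     active_tiles = [tile for tile in tiles if tile]  # remove spaces
--     merged_tiles = []
--
--     i = 0
--     size = len(active_tiles)
--     while i < size:
--         if i == size - 1:
--             merged_tiles.append(active_tiles[i])  # last tile unchanged
--             break
--         if active_tiles[i] == active_tiles[i+1]:
--             merged_tiles.append(active_tiles[i] * 2)  # merge the tiles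
--             i+= 2  # skip over next tile
--         else:
--             merged_tiles.append(active_tiles[i])
--             i+= 1
--
--     return merged_tiles + [0] * (len(tiles) - len(merged_tiles)) # 0 fill at right
-- ===== SOURCE B (Python) =====
-- def left_slide(tiles):
--     active = [t for t in tiles if t]
--     result = []
--     just_merged = False
--     for t in active:
--         if result and result[-1] == t and not just_merged:
--             result[-1] *= 2
--             just_merged = True
--         else:
--             result.append(t)
--             just_merged = False
--     return result + [0] * (len(tiles) - len(result))
-- ===== Notes on version B (the rewrite author's own statement) =====
-- stated objective: alternative
-- what changed: Replaces A's index-with-skip pairing (compare the tile at i with the tile at i+1, advance i by 2 on merge) by a single accumulator pass with a just_merged flag that merges each tile into the last element of the result at most once.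
import Mathlib
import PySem

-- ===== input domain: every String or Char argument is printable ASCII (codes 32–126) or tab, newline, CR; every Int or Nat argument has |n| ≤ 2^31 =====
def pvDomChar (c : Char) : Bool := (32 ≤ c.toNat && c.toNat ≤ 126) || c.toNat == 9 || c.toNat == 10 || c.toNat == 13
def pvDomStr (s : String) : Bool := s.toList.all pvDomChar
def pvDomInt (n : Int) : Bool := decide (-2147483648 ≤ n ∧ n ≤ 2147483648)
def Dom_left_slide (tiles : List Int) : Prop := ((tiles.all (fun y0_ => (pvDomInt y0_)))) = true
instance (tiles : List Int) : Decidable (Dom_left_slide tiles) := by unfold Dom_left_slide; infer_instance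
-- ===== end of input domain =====

-- B replaces A's index-with-skip pairing by one accumulator pass with a just_merged flag (alternative decomposition, same cost).

-- ===== PORT A =====
-- A's while loop over active_tiles with i advancing by 1 or 2, as structural recursion.
def leftSlideMergeA : List Int → List Int
  | [] => []
  | [x] => [x]
  | x :: y :: rest =>
    if x = y then x * 2 :: leftSlideMergeA rest
    else x :: leftSlideMergeA (y :: rest)

def left_slide (tiles : List Int) : List Int :=
  let active := tiles.filter (fun t => t != 0)
  let merged := leftSlideMergeA active
  merged ++ List.replicate (tiles.length - merged.length) 0

-- ===== PORT B =====
def leftSlideStepB (st : List Int × Bool) (t : Int) : List Int × Bool :=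
  if st.1 ≠ [] ∧ st.1.getLast? = some t ∧ st.2 = false then
    (st.1.dropLast ++ [t * 2], true)   -- result[-1] *= 2; just_merged = True
  else
    (st.1 ++ [t], false)               -- result.append(t); just_merged = False

def left_slide_alt (tiles : List Int) : List Int :=
  let active := tiles.filter (fun t => t != 0)
  let result := (active.foldl leftSlideStepB ([], false)).1
  result ++ List.replicate (tiles.length - result.length) 0

-- ===== PRECONDITION & SPEC =====
def Spec_left_slide (tiles : List Int) (out : List Int) : Prop := out = left_slide_alt tiles
instance (tiles : List Int) (out : List Int) : Decidable (Spec_left_slide tiles out) := by unfold Spec_left_slide; infer_instance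

-- ===== CLAIM (what is proved, stated in full; the proofs are below) =====
def Claim_equal_left_slide : Prop := ∀ (tiles : List Int), Dom_left_slide tiles → Spec_left_slide tiles (left_slide tiles)

-- ===== LEMMAS AND PROOFS =====

-- A's merge seen as "head tile in hand": mergeCont x l processes l with pending tile x.
def leftSlideCont (x : Int) : List Int → List Int
  | [] => [x]
  | y :: rest => if x = y then x * 2 :: leftSlideMergeA rest else x :: leftSlideCont y rest

theorem mergeA_cons (l : List Int) : ∀ x, leftSlideMergeA (x :: l) = leftSlideCont x l := by
  induction l with
  | nil => intro x; rfl
  | cons y rest ih =>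
    intro x
    simp only [leftSlideMergeA, leftSlideCont]
    split_ifs with h
    · rfl
    · rw [ih]

theorem foldB_invariant (l : List Int) :
    (∀ x res, (l.foldl leftSlideStepB (res ++ [x], false)).1 = res ++ leftSlideCont x l)
    ∧ (∀ res, (l.foldl leftSlideStepB (res, true)).1 = res ++ leftSlideMergeA l) := by
  induction l with
  | nil => exact ⟨fun x res => rfl, fun res => by simp [leftSlideMergeA]⟩
  | cons y rest ih =>
    constructor
    · intro x res
      simp only [List.foldl_cons]
      by_cases h : x = y
      · have hstep : leftSlideStepB (res ++ [x], false) y = (res ++ [y * 2], true) := by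
          simp [leftSlideStepB, h]
        rw [hstep, ih.2]
        simp [leftSlideCont, h]
      · have hstep : leftSlideStepB (res ++ [x], false) y = ((res ++ [x]) ++ [y], false) := by
          simp [leftSlideStepB, h]
        rw [hstep, ih.1 y (res ++ [x])]
        simp [leftSlideCont, h]
    · intro res
      simp only [List.foldl_cons]
      have hstep : leftSlideStepB (res, true) y = (res ++ [y], false) := by
        simp [leftSlideStepB]
      rw [hstep, ih.1 y res, mergeA_cons]

theorem foldB_eq_mergeA (l : List Int) :
    (l.foldl leftSlideStepB ([], false)).1 = leftSlideMergeA l := by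
  cases l with
  | nil => rfl
  | cons x rest =>
    have hstep : leftSlideStepB ([], false) x = (([] : List Int) ++ [x], false) := by
      simp [leftSlideStepB]
    simp only [List.foldl_cons]
    rw [hstep, (foldB_invariant rest).1 x [], mergeA_cons]
    rfl

-- ===== VERDICT (by name: the statement is the Claim_ definition above) =====
theorem left_slide_spec : Claim_equal_left_slide := by
  intro tiles _
  simp only [Spec_left_slide, left_slide, left_slide_alt, foldB_eq_mergeA]
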